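-- pv_equiv track=rewrite | github.com/musab05/NetErrorControl | bitstuffing.py | bit_stuffing
-- ===== SOURCE A (Python) =====
-- STX = '0111111110'
--
-- ETX = '0111111110'
--
-- BIT_TO_INSERT = '0'
--
-- def bit_stuffing(data):
--   stuffed_data = [STX]
--   consecutive_ones = 0
--
--   for bit in data:
--     if bit == '1':
--       consecutive_ones += 1
--     else:
--       consecutive_ones = 0
--     stuffed_data.append(bit)
--
--     if consecutive_ones == 5:
--       stuffed_data.append(BIT_TO_INSERT)
--       consecutive_ones = 0
--   stuffed_data.append(ETX)
--   return ''.join(stuffed_data)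
-- ===== SOURCE B (Python) =====
-- STX = '0111111110'
--
-- ETX = '0111111110'
--
--
-- def bit_stuffing(data):
--     # str.replace consumes each leftmost non-overlapping run of five '1's and
--     # appends the stuffed '0', exactly matching the count-to-5-then-reset loop.
--     return STX + data.replace('11111', '111110') + ETX
-- ===== Notes on version B (the rewrite author's own statement) =====
-- stated objective: idiomatic
-- what changed: The explicit per-bit counter loop with list accumulation and join is replaced by a single str.replace substitution of each leftmost non-overlapping run of five ones by the stuffed run (which coincides with the count-to-5-then-reset behaviour), concatenated between STX and ETX.
import Mathlib
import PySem

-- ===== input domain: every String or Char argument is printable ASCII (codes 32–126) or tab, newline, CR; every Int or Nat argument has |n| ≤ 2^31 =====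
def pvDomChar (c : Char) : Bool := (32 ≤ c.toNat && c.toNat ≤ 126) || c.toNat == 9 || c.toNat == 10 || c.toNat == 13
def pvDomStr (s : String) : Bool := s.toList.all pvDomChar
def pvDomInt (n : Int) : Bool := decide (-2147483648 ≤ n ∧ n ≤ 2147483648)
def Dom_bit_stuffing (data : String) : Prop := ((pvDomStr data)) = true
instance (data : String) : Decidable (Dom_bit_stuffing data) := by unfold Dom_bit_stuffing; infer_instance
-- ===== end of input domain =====

-- B replaces A's per-bit counter loop by one str.replace substitution (idiomatic; same O(n) cost).

-- ===== PORT A =====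
-- loop body of A: count consecutive ones, append the bit, stuff a '0' after five ones
def pvStepA (st : List String × Int) (bit : Char) : List String × Int :=
  let consecutive_ones : Int := if bit = '1' then st.2 + 1 else 0
  let stuffed_data := st.1 ++ [String.singleton bit]
  if consecutive_ones = 5 then (stuffed_data ++ ["0"], 0) else (stuffed_data, consecutive_ones)

def bit_stuffing (data : String) : String :=
  PySem.Str.join "" ((data.toList.foldl pvStepA (["0111111110"], 0)).1 ++ ["0111111110"])

-- ===== PORT B =====
def bit_stuffing_alt (data : String) : String :=
  "0111111110" ++ PySem.Str.replace data "11111" "111110" ++ "0111111110"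

-- ===== PRECONDITION & SPEC =====
def Spec_bit_stuffing (data : String) (out : String) : Prop := out = bit_stuffing_alt data
instance (data : String) (out : String) : Decidable (Spec_bit_stuffing data out) := by unfold Spec_bit_stuffing; infer_instance

-- ===== CLAIM (what is proved, stated in full; the proofs are below) =====
def Claim_equal_bit_stuffing : Prop := ∀ (data : String), Dom_bit_stuffing data → Spec_bit_stuffing data (bit_stuffing data)

-- ===== LEMMAS AND PROOFS =====

-- the stuffed body as A computes it: counter-driven scan (counter c, 0 ≤ c ≤ 4)
def pvStuff : Nat → List Char → List Char
  | _, [] => []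
  | c, b :: t =>
    if b = '1' then
      if c = 4 then '1' :: '0' :: pvStuff 0 t else '1' :: pvStuff (c + 1) t
    else b :: pvStuff 0 t

-- A's foldl produces exactly pvStuff 0 (each bit as a singleton string)
theorem pv_foldl_stuff (l : List Char) : ∀ (c : Nat), c ≤ 4 → ∀ sd : List String,
    (l.foldl pvStepA (sd, (c : Int))).1 = sd ++ (pvStuff c l).map String.singleton := by
  induction l with
  | nil => intro c _ sd; simp [pvStuff]
  | cons b t ih =>
    intro c hc sd
    by_cases hb : b = '1'
    · subst hb
      by_cases hc4 : c = 4
      · subst hc4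
        have hstep : pvStepA (sd, ((4 : Nat) : Int)) '1'
            = (sd ++ [String.singleton '1'] ++ ["0"], 0) := by
          simp [pvStepA]
        rw [List.foldl_cons, hstep]
        have h0 := ih 0 (by omega) (sd ++ [String.singleton '1'] ++ ["0"])
        simp only [Int.natCast_zero] at h0
        rw [h0]
        simp [pvStuff]
        rfl
      · have h5 : ¬((c : Int) + 1 = 5) := by omega
        have hstep : pvStepA (sd, (c : Int)) '1'
            = (sd ++ [String.singleton '1'], ((c + 1 : Nat) : Int)) := by
          simp [pvStepA, h5]
        rw [List.foldl_cons, hstep, ih (c + 1) (by omega) (sd ++ [String.singleton '1'])]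
        simp [pvStuff, hc4]
    · have hstep : pvStepA (sd, (c : Int)) b = (sd ++ [String.singleton b], 0) := by
        simp [pvStepA, hb]
      rw [List.foldl_cons, hstep]
      have h0 := ih 0 (by omega) (sd ++ [String.singleton b])
      simp only [Int.natCast_zero] at h0
      rw [h0]
      simp [pvStuff, hb]

-- a short run of ones (no n ones ahead) makes the counter value irrelevant (c+1 vs c)
theorem pv_stuff_irrel (t : List Char) : ∀ (n c : Nat), c + n = 4 →
    t.take n ≠ List.replicate n '1' → pvStuff (c + 1) t = pvStuff c t := by
  induction t with
  | nil => intro n c _ _; simp [pvStuff]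
  | cons x t ih =>
    intro n c hcn hne
    cases n with
    | zero => exact absurd rfl hne
    | succ m =>
      by_cases hx : x = '1'
      · subst hx
        cases m with
        | zero => simp at hne
        | succ k =>
          have hne' : t.take (k + 1) ≠ List.replicate (k + 1) '1' := by
            intro h; apply hne
            simp [List.take_succ_cons, List.replicate_succ, h]
          have hc1 : ¬(c + 1 = 4) := by omega
          have hc0 : ¬(c = 4) := by omega
          simp only [pvStuff, if_neg hc1, if_neg hc0]
          rw [ih (k + 1) (c + 1) (by omega) hne']
      · simp [pvStuff, hx]

-- pvStuff 0 agrees with the leftmost-match scan of replace.go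
theorem pv_go_stuff : ∀ (fuel : Nat) (l acc : List Char), l.length ≤ fuel →
    PySem.Chars.replace.go ['1','1','1','1','1'] ['1','1','1','1','1','0'] fuel l acc
      = acc.reverse ++ pvStuff 0 l := by
  intro fuel
  induction fuel with
  | zero =>
    intro l acc hl
    have : l = [] := by cases l <;> simp_all
    subst this
    simp [PySem.Chars.replace.go, pvStuff]
  | succ f ih =>
    intro l acc hl
    cases l with
    | nil => simp [PySem.Chars.replace.go, pvStuff]
    | cons b t =>
      by_cases hp : (['1','1','1','1','1'] : List Char).isPrefixOf (b :: t)
      · obtain ⟨rest, hrest⟩ := (List.isPrefixOf_iff_prefix.mp hp)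
        simp only [PySem.Chars.replace.go, if_pos hp]
        have hdrop : (b :: t).drop (['1','1','1','1','1'] : List Char).length = rest := by
          rw [← hrest]; simp
        rw [hdrop]
        have hlen : (b :: t).length = 5 + rest.length := by
          rw [← hrest]; simp; omega
        rw [ih rest (List.reverse ['1','1','1','1','1','0'] ++ acc) (by omega)]
        have hstuff : pvStuff 0 (b :: t) = ['1','1','1','1','1','0'] ++ pvStuff 0 rest := by
          rw [← hrest]; simp [pvStuff]
        rw [hstuff]; simp
      · simp only [PySem.Chars.replace.go, if_neg hp]
        rw [ih t (b :: acc) (by simp at hl; omega)]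
        have hstuff : pvStuff 0 (b :: t) = b :: pvStuff 0 t := by
          by_cases hb : b = '1'
          · subst hb
            have hne : t.take 4 ≠ List.replicate 4 '1' := by
              intro h
              apply hp
              rw [List.isPrefixOf_iff_prefix, List.prefix_iff_eq_take]
              simp only [List.length_cons, List.length_nil]
              rw [show List.take (0+1+1+1+1+1) ('1' :: t) = '1' :: List.take 4 t from rfl, h]
              rfl
            simp only [pvStuff]
            norm_num
            exact pv_stuff_irrel t 4 0 (by omega) hne
          · simp [pvStuff, hb]
        rw [hstuff]; simp

-- replace with pattern '11111' is the counter scan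
theorem pv_replace_eq_stuff (l : List Char) :
    PySem.Chars.replace l ['1','1','1','1','1'] ['1','1','1','1','1','0'] = pvStuff 0 l := by
  unfold PySem.Chars.replace
  simp only [List.isEmpty_cons, Bool.false_eq_true, if_false]
  exact pv_go_stuff l.length l [] (le_refl _)

-- ===== VERDICT (by name: the statement is the Claim_ definition above) =====
theorem pv_join_nil (parts : List (List Char)) : PySem.Chars.join [] parts = parts.flatten := by
  induction parts with
  | nil => rfl
  | cons p ps ih =>
    cases ps with
    | nil => simp [PySem.Chars.join, List.intercalate]
    | cons q qs =>
      simp only [PySem.Chars.join, List.intercalate, List.intersperse] at *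
      simp [List.flatten] at *
      simpa using ih

-- ===== VERDICT (by name: the statement is the Claim_ definition above) =====
theorem bit_stuffing_spec : Claim_equal_bit_stuffing := by
  intro data _
  unfold Spec_bit_stuffing bit_stuffing bit_stuffing_alt
  have hA := pv_foldl_stuff data.toList 0 (by omega) ["0111111110"]
  simp only [Int.natCast_zero] at hA
  rw [hA]
  apply String.toList_inj.mp
  simp only [PySem.Str.join, PySem.Str.replace, String.toList_append, String.toList_ofList]
  rw [show "".toList = ([] : List Char) from rfl, pv_join_nil,
    show "11111".toList = ['1','1','1','1','1'] from rfl,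
    show "111110".toList = ['1','1','1','1','1','0'] from rfl, pv_replace_eq_stuff]
  simp [List.map_map, Function.comp_def]
  rw [← pv_join_nil, PySem.Chars.join_nil_singletons]
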